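-- pv_equiv track=rewrite | github.com/lc-cbot/demo-data-extension | log_template_processor.py | distribute_dates
-- ===== SOURCE A (Python) =====
-- def distribute_dates(num_lines, dates):
--     """
--     Distribute dates across log lines to spread events over 7 days.
--     Returns a list of date strings, one per line.
--     """
--     if num_lines == 0:
--         return []
--
--     # Distribute lines across available dates
--     date_assignments = []
--     for i in range(num_lines):
--         # Map line index to a date index (spreads evenly)
--         date_idx = (i * len(dates)) // num_lines
--         date_assignments.append(dates[date_idx])
--
--     return date_assignments
-- ===== SOURCE B (Python) =====
-- def _ceil_div(a, b):
--     return -((-a) // b)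
--
--
-- def distribute_dates(num_lines, dates):
--     if num_lines == 0:
--         return []
--     result = []
--     for d in range(len(dates)):
--         start = _ceil_div(d * num_lines, len(dates))
--         end = _ceil_div((d + 1) * num_lines, len(dates))
--         result.extend([dates[d]] * (end - start))
--     return result
-- ===== Notes on version B (the rewrite author's own statement) =====
-- stated objective: alternative
-- what changed: B iterates over the date indices instead of the line indices: for each date d it computes with ceiling division the half-open block of lines [ceil(d*num_lines/len(dates)), ceil((d+1)*num_lines/len(dates))) that A's floor mapping sends to d, and emits that many copies of dates[d] at once, removing the per-line index computation.
import Mathlib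
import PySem

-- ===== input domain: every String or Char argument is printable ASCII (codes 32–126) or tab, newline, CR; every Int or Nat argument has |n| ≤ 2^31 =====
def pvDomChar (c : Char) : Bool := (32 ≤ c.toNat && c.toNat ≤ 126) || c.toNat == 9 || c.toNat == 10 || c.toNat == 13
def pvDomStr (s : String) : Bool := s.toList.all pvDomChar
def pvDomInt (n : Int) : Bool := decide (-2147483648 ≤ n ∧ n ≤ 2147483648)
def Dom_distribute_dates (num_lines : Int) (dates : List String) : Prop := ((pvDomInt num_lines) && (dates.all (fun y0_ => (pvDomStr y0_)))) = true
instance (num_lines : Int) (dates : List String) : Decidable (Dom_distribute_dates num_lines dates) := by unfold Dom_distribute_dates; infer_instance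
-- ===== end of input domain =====

-- B iterates over the date indices and emits each date's whole block of lines via ceiling-division
-- boundaries, instead of A's per-line floor-division index (objective: alternative decomposition).


-- ===== PORT A =====
def distribute_dates (num_lines : Int) (dates : List String) : List String :=
  if num_lines = 0 then []
  else
    (PySem.List.pyRange 0 num_lines 1).foldl
      (fun acc i =>
        acc ++ [PySem.List.pyGetD dates (PySem.Int.floordiv (i * (dates.length : Int)) num_lines) ""])
      []

-- ===== PORT B =====
-- helper mirroring Source B's _ceil_div(a, b) = -((-a) // b)
def pvCeilDiv (a b : Int) : Int := -(PySem.Int.floordiv (-a) b)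

def distribute_dates_alt (num_lines : Int) (dates : List String) : List String :=
  if num_lines = 0 then []
  else
    (PySem.List.pyRange 0 (dates.length : Int) 1).foldl
      (fun acc d =>
        acc ++ List.replicate (pvCeilDiv ((d + 1) * num_lines) (dates.length : Int)
                  - pvCeilDiv (d * num_lines) (dates.length : Int)).toNat
                 (PySem.List.pyGetD dates d ""))
      []

-- ===== PRECONDITION & SPEC =====
-- Pre_ excludes exactly the inputs where A raises IndexError (num_lines > 0 with an empty dates
-- list, where A evaluates dates[0]); B's loop over the dates is empty there and returns [].
def Pre_distribute_dates (num_lines : Int) (dates : List String) : Prop :=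
  0 < num_lines → dates ≠ []
instance (num_lines : Int) (dates : List String) : Decidable (Pre_distribute_dates num_lines dates) := by
  unfold Pre_distribute_dates; infer_instance

def pvWitness_distribute_dates : Int × List String := (3, ["2024-01-01", "2024-01-02"])

def Spec_distribute_dates (num_lines : Int) (dates : List String) (out : List String) : Prop := out = distribute_dates_alt num_lines dates
instance (num_lines : Int) (dates : List String) (out : List String) : Decidable (Spec_distribute_dates num_lines dates out) := by unfold Spec_distribute_dates; infer_instance

-- ===== CLAIM (what is proved, stated in full; the proofs are below) =====
def Claim_equal_distribute_dates : Prop := ∀ (num_lines : Int) (dates : List String), Dom_distribute_dates num_lines dates → Pre_distribute_dates num_lines dates → Spec_distribute_dates num_lines dates (distribute_dates num_lines dates)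

-- ===== LEMMAS AND PROOFS =====

lemma pvCeilDiv_bracket (a : Int) {b : Int} (hb : 0 < b) :
    (pvCeilDiv a b - 1) * b < a ∧ a ≤ pvCeilDiv a b * b :=
  (PySem.Int.neg_floordiv_neg_eq_iff_of_pos hb).mp (by simp [pvCeilDiv])

lemma pvCeilDiv_mono {a a' b : Int} (hb : 0 < b) (h : a ≤ a') :
    pvCeilDiv a b ≤ pvCeilDiv a' b := by
  obtain ⟨h1, h2⟩ := pvCeilDiv_bracket a hb
  obtain ⟨h1', h2'⟩ := pvCeilDiv_bracket a' hb
  by_contra hc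
  push Not at hc
  nlinarith

lemma pvCeilDiv_nonneg {a b : Int} (hb : 0 < b) (ha : 0 ≤ a) : 0 ≤ pvCeilDiv a b := by
  obtain ⟨h1, h2⟩ := pvCeilDiv_bracket a hb
  nlinarith

lemma pvCeilDiv_mul_self {n b : Int} (hb : 0 < b) : pvCeilDiv (b * n) b = n := by
  obtain ⟨h1, h2⟩ := pvCeilDiv_bracket (b * n) hb
  have hle : pvCeilDiv (b * n) b ≤ n := by nlinarith
  have hge : n ≤ pvCeilDiv (b * n) b := by nlinarith
  omega

lemma pvBlocks (n : Int) (hn : 0 < n) (dates : List String) (hL : (0 : Int) < dates.length) :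
    ∀ (j : Nat), j ≤ dates.length →
      (PySem.List.pyRange 0 (pvCeilDiv ((j : Int) * n) (dates.length : Int)) 1).map
          (fun i => PySem.List.pyGetD dates (PySem.Int.floordiv (i * (dates.length : Int)) n) "")
        = (PySem.List.pyRange 0 (j : Int) 1).flatMap
            (fun d => List.replicate (pvCeilDiv ((d + 1) * n) (dates.length : Int)
                        - pvCeilDiv (d * n) (dates.length : Int)).toNat
                (PySem.List.pyGetD dates d "")) := by
  intro j
  induction j with
  | zero =>
    intro _
    have h0 : pvCeilDiv (0 : Int) (dates.length : Int) = 0 := by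
      have := pvCeilDiv_mul_self (n := 0) hL
      simpa using this
    simp [h0, PySem.List.pyRange_one_eq_nil (le_refl (0 : Int))]
  | succ j ih =>
    intro hj1
    have hj : j ≤ dates.length := Nat.le_of_succ_le hj1
    have hcast : ((j + 1 : Nat) : Int) = (j : Int) + 1 := by push_cast; ring
    rw [hcast]
    have hjn0 : (0 : Int) ≤ (j : Int) * n := by positivity
    have h0j : 0 ≤ pvCeilDiv ((j : Int) * n) (dates.length : Int) := pvCeilDiv_nonneg hL hjn0
    have hmono : pvCeilDiv ((j : Int) * n) (dates.length : Int)
        ≤ pvCeilDiv (((j : Int) + 1) * n) (dates.length : Int) :=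
      pvCeilDiv_mono hL (by nlinarith)
    rw [PySem.List.pyRange_one_append 0 (pvCeilDiv ((j : Int) * n) (dates.length : Int))
          (pvCeilDiv (((j : Int) + 1) * n) (dates.length : Int)) h0j hmono]
    rw [List.map_append]
    rw [PySem.List.pyRange_one_succ_right (by positivity : (0 : Int) ≤ (j : Int))]
    rw [List.flatMap_append]
    congr 1
    · exact ih hj
    · simp only [List.flatMap_cons, List.flatMap_nil, List.append_nil]
      rw [List.eq_replicate_iff]
      constructor
      · simp [PySem.List.length_pyRange_one]
      · intro b hb
        simp only [List.mem_map] at hb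
        obtain ⟨i, hi, rfl⟩ := hb
        rw [PySem.List.mem_pyRange_one] at hi
        obtain ⟨hi1, hi2⟩ := hi
        obtain ⟨hb1, hb2⟩ := pvCeilDiv_bracket ((j : Int) * n) hL
        obtain ⟨hb1', hb2'⟩ := pvCeilDiv_bracket (((j : Int) + 1) * n) hL
        have hfd : PySem.Int.floordiv (i * (dates.length : Int)) n = (j : Int) := by
          rw [PySem.Int.floordiv_eq_iff_of_pos hn]
          constructor
          · nlinarith
          · nlinarith
        rw [hfd]

-- ===== VERDICT (by name: the statement is the Claim_ definition above) =====
theorem distribute_dates_spec : Claim_equal_distribute_dates := by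
  intro n dates _ hpre
  unfold Spec_distribute_dates distribute_dates distribute_dates_alt
  by_cases h0 : n = 0
  · simp [h0]
  · rw [if_neg h0, if_neg h0]
    rw [PySem.List.foldl_append_singleton_eq_map, PySem.List.foldl_append_eq_flatMap]
    simp only [List.nil_append]
    rcases lt_or_gt_of_ne h0 with hneg | hpos
    · rw [PySem.List.pyRange_one_eq_nil (le_of_lt hneg)]
      simp only [List.map_nil]
      symm
      rw [List.flatMap_eq_nil_iff]
      intro d hd
      rw [PySem.List.mem_pyRange_one] at hd
      have hL : (0 : Int) < dates.length := lt_of_le_of_lt hd.1 hd.2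
      have hmono : pvCeilDiv ((d + 1) * n) (dates.length : Int)
          ≤ pvCeilDiv (d * n) (dates.length : Int) :=
        pvCeilDiv_mono hL (by nlinarith [hd.1, hneg])
      have : (pvCeilDiv ((d + 1) * n) (dates.length : Int)
          - pvCeilDiv (d * n) (dates.length : Int)).toNat = 0 := by omega
      rw [this, List.replicate_zero]
    · have hne : dates ≠ [] := hpre hpos
      have hL : (0 : Int) < dates.length := by
        have : dates.length ≠ 0 := by simpa using hne
        exact_mod_cast Nat.pos_of_ne_zero this
      have key := pvBlocks n hpos dates hL dates.length le_rfl
      rw [pvCeilDiv_mul_self hL] at key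
      exact key
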